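-- pv_equiv track=rewrite | github.com/cathal0317/Algorithm_Practice | Codility/Binary_0s.py | solution
-- ===== SOURCE A (Python) =====
-- def solution(N):
--     # Implement your solution here
--     converted = bin(N)
--
--     indices = []
--     for i, ch in enumerate(converted[2:]):
--         if ch == "1":
--             indices.append(i)
--
--     if len(indices) < 2:
--         return 0
--
--     diff = []
--     for curr, nxt in zip(indices, indices[1:]):
--         diff.append(nxt-curr-1)
--
--     return max(diff)
-- ===== SOURCE B (Python) =====
-- def solution(N):
--     n = abs(N)
--     best = 0
--     cur = 0
--     seen = False
--     while n > 0:
--         if n % 2 == 1: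
--             if seen and cur > best:
--                 best = cur
--             seen = True
--             cur = 0
--         else:
--             cur += 1
--         n //= 2
--     return best
-- ===== Notes on version B (the rewrite author's own statement) =====
-- stated objective: alternative
-- what changed: B replaces A's build-binary-string / collect-1-indices / pairwise-subtract / max pipeline by a single arithmetic loop over |N|'s bits (n%2, n//2) that tracks the current zero-run and the best interior run, never materialising the string or any index lists.
import Mathlib
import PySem

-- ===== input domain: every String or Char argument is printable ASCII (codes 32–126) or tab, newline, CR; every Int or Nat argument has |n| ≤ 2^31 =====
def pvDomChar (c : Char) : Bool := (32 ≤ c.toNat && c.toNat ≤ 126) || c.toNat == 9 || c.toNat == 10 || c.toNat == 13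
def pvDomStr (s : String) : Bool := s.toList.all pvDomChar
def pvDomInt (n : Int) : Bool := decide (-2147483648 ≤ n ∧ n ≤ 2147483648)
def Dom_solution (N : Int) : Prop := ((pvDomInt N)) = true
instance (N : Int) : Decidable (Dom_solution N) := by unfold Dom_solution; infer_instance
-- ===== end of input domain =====

-- B replaces A's binary-string / index-list / pairwise-difference / max pipeline by a single
-- arithmetic loop over |N|'s bits tracking the current zero-run and the best interior run.

-- ===== PORT A =====
def solution (N : Int) : Int :=
  let converted := PySem.Int.toBinChars0b N
  let indices := (PySem.List.enumerate (PySem.List.slice converted (some 2) none) 0).foldl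
      (fun acc x => if x.2 == '1' then acc ++ [x.1] else acc) ([] : List Int)
  if PySem.List.len indices < 2 then 0
  else
    let diff := (indices.zip (PySem.List.slice indices (some 1) none)).foldl
        (fun acc p => acc ++ [p.2 - p.1 - 1]) ([] : List Int)
    match PySem.List.max? diff (fun x => x) with
    | some m => m
    | none => 0  -- unreachable: diff is nonempty under the guard (Python's max is on a nonempty list)

-- ===== PORT B =====
-- while-loop transliterated with a structural fuel counter (n halves each step, so n+1 steps suffice)
def solAltLoop : Nat → Nat → Int → Int → Bool → Int
  | 0, _, best, _, _ => best
  | fuel + 1, n, best, cur, seen =>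
    if n = 0 then best
    else if n % 2 = 1 then
      solAltLoop fuel (n / 2) (if seen && cur > best then cur else best) 0 true
    else
      solAltLoop fuel (n / 2) best (cur + 1) seen

def solution_alt (N : Int) : Int := solAltLoop (N.natAbs + 1) N.natAbs 0 0 false

-- ===== PRECONDITION & SPEC =====
def Spec_solution (N : Int) (out : Int) : Prop := out = solution_alt N
instance (N : Int) (out : Int) : Decidable (Spec_solution N out) := by unfold Spec_solution; infer_instance

-- ===== CLAIM (what is proved, stated in full; the proofs are below) =====
def Claim_equal_solution : Prop := ∀ (N : Int), Dom_solution N → Spec_solution N (solution N)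

-- ===== LEMMAS AND PROOFS =====

-- Binary digit characters of n, most significant first (what Nat.toDigits 2 computes).
def bitsChars (n : Nat) : List Char :=
  if n < 2 then [Nat.digitChar (n % 2)]
  else bitsChars (n / 2) ++ [Nat.digitChar (n % 2)]
termination_by n
decreasing_by exact Nat.div_lt_self (by omega) (by omega)

theorem toDigitsCore_two_eq (f : Nat) : ∀ (n : Nat) (ds : List Char), n / 2 < f →
    Nat.toDigitsCore 2 f n ds = bitsChars n ++ ds := by
  induction f with
  | zero => intro n ds h; omega
  | succ f ih =>
    intro n ds h
    rw [Nat.toDigitsCore]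
    by_cases h2 : n / 2 = 0
    · rw [if_pos h2]
      conv_rhs => rw [bitsChars, if_pos (by omega)]
      rfl
    · rw [if_neg h2, ih (n / 2) _ (by omega)]
      conv_rhs => rw [bitsChars, if_neg (by omega)]
      rw [List.append_assoc]
      rfl

theorem toDigits_two_eq (n : Nat) : Nat.toDigits 2 n = bitsChars n := by
  rw [Nat.toDigits, toDigitsCore_two_eq (n + 1) n [] (by omega)]
  simp

-- Structural descriptions of the run structure of a digit-character list.
def oneIn : List Char → Bool
  | [] => false
  | d :: cs => (d == '1') || oneIn cs

def leadRun : List Char → Int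
  | [] => 0
  | d :: cs => if d = '1' then 0 else leadRun cs + 1

def maxGapF : List Char → Int
  | [] => 0
  | d :: cs =>
    if d = '1' then (if oneIn cs && leadRun cs > maxGapF cs then leadRun cs else maxGapF cs)
    else maxGapF cs

theorem leadRun_nonneg (cs : List Char) : 0 ≤ leadRun cs := by
  induction cs with
  | nil => simp [leadRun]
  | cons d cs ih => simp only [leadRun]; split <;> omega

-- one step of B's loop, on a digit character
def stepFn (st : Int × Int × Bool) (d : Char) : Int × Int × Bool :=
  if d = '1' then ((if st.2.2 && st.2.1 > st.1 then st.2.1 else st.1), 0, true)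
  else (st.1, st.2.1 + 1, st.2.2)

theorem solAltLoop_eq (f : Nat) : ∀ (n : Nat) (best cur : Int) (seen : Bool), n < f →
    solAltLoop f n best cur seen = ((bitsChars n).reverse.foldl stepFn (best, cur, seen)).1 := by
  induction f with
  | zero => intro n _ _ _ h; omega
  | succ f ih =>
    intro n best cur seen hf
    by_cases h0 : n = 0
    · subst h0
      rw [show bitsChars 0 = ['0'] from by rw [bitsChars]; rfl]
      simp [solAltLoop, stepFn]
    · by_cases h1 : n < 2
      · have hn1 : n = 1 := by omega
        subst hn1
        rw [show bitsChars 1 = ['1'] from by rw [bitsChars]; rfl]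
        simp only [solAltLoop, if_neg h0, List.reverse_singleton,
          List.foldl_cons, List.foldl_nil]
        rcases f with _ | f
        · omega
        · simp [solAltLoop, stepFn]
      · conv_rhs => rw [bitsChars, if_neg (by omega)]
        rw [List.reverse_append]
        simp only [List.reverse_singleton, List.singleton_append, List.foldl_cons]
        have hd2 : n / 2 < f := by omega
        rw [solAltLoop]
        rw [if_neg h0]
        by_cases hm : n % 2 = 1
        · rw [if_pos hm, ih (n / 2) _ _ _ hd2]
          have : stepFn (best, cur, seen) (n % 2).digitChar
              = ((if seen && cur > best then cur else best), 0, true) := by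
            rw [hm]; simp [stepFn, Nat.digitChar]
          rw [this]
        · rw [if_neg hm, ih (n / 2) _ _ _ hd2]
          have hm0 : n % 2 = 0 := by omega
          have : stepFn (best, cur, seen) (n % 2).digitChar = (best, cur + 1, seen) := by
            rw [hm0]; simp [stepFn, Nat.digitChar]
          rw [this]

theorem foldl_stepFn_reverse (cs : List Char) :
    cs.reverse.foldl stepFn (0, 0, false) = (maxGapF cs, leadRun cs, oneIn cs) := by
  induction cs with
  | nil => simp [maxGapF, leadRun, oneIn]
  | cons d cs ih =>
    rw [List.reverse_cons, List.foldl_append, ih]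
    simp only [List.foldl_cons, List.foldl_nil]
    by_cases hd : d = '1'
    · subst hd; simp [stepFn, maxGapF, leadRun, oneIn]
    · simp [stepFn, hd, maxGapF, leadRun, oneIn]

theorem solution_alt_eq (N : Int) : solution_alt N = maxGapF (bitsChars N.natAbs) := by
  rw [solution_alt, solAltLoop_eq (N.natAbs + 1) N.natAbs 0 0 false (by omega), foldl_stepFn_reverse]

-- ----- A side -----

-- indices (starting at i) of the '1' characters of cs
def idxs : List Char → Int → List Int
  | [], _ => []
  | d :: cs, i => if d = '1' then i :: idxs cs (i + 1) else idxs cs (i + 1)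

theorem foldl_idx (cs : List Char) : ∀ (acc : List Int) (i : Int),
    (PySem.List.enumerate cs i).foldl
      (fun acc x => if x.2 == '1' then acc ++ [x.1] else acc) acc = acc ++ idxs cs i := by
  induction cs with
  | nil => intro acc i; simp [PySem.List.enumerate_nil, idxs]
  | cons d cs ih =>
    intro acc i
    rw [PySem.List.enumerate_cons, List.foldl_cons]
    by_cases hd : d = '1'
    · simp only [hd, idxs]
      rw [if_pos (by simp), ih]
      simp
    · simp only [idxs, if_neg hd]
      rw [if_neg (by simpa using hd), ih]

theorem idxs_shift (cs : List Char) : ∀ (i : Int), idxs cs i = (idxs cs 0).map (i + ·) := by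
  induction cs with
  | nil => intro i; simp [idxs]
  | cons d cs ih =>
    intro i
    simp only [idxs]
    by_cases hd : d = '1'
    · simp only [if_pos hd, List.map_cons]
      rw [ih (i + 1), ih (0 + 1), List.map_map]
      congr 1
      · omega
      · apply List.map_congr_left
        intro x _
        simp only [Function.comp]
        omega
    · simp only [if_neg hd]
      rw [ih (i + 1), ih (0 + 1), List.map_map]
      apply List.map_congr_left
      intro x _
      simp only [Function.comp]
      omega

def diffs (l : List Int) : List Int := (l.zip l.tail).map (fun p => p.2 - p.1 - 1)

theorem diffs_map_add (l : List Int) (i : Int) : diffs (l.map (i + ·)) = diffs l := by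
  unfold diffs
  rw [show (l.map (i + ·)).tail = l.tail.map (i + ·) by cases l <;> simp, List.zip_map,
    List.map_map]
  apply List.map_congr_left
  intro p _
  simp only [Function.comp, Prod.map]
  omega

def pipeFrom (l : List Int) : Int :=
  if PySem.List.len l < 2 then 0
  else match PySem.List.max? (diffs l) (fun x => x) with
       | some m => m
       | none => 0

theorem solution_eq_pipe (N : Int) :
    solution N = pipeFrom (idxs (PySem.List.slice (PySem.Int.toBinChars0b N) (some 2) none) 0) := by
  rw [solution]
  simp only [foldl_idx, List.nil_append, PySem.List.slice_from_one,
    PySem.List.foldl_append_singleton_eq_map, List.nil_append]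
  rfl

theorem foldl_max_max (l : List Int) : ∀ (a b : Int), l.foldl max (max a b) = max a (l.foldl max b) := by
  induction l with
  | nil => intro a b; simp
  | cons c l ih =>
    intro a b
    simp only [List.foldl_cons]
    rw [max_assoc, ih]

-- main characterisation of A's pipeline
theorem pipe_idxs (cs : List Char) :
    pipeFrom (idxs cs 0) = maxGapF cs ∧
      (idxs cs 0).head? = (if oneIn cs then some (leadRun cs) else none) := by
  induction cs with
  | nil => simp [idxs, pipeFrom, maxGapF, oneIn, PySem.List.len]
  | cons d cs ih =>
    obtain ⟨ihp, ihh⟩ := ih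
    by_cases hd : d = '1'
    · simp only [idxs, hd, maxGapF, oneIn, leadRun]
      simp only [if_true, zero_add, beq_self_eq_true, Bool.true_or]
      by_cases h1 : oneIn cs
      · rw [if_pos h1] at ihh
        obtain ⟨j, rest, hjr⟩ : ∃ j rest, idxs cs 0 = j :: rest := by
          cases hx : idxs cs 0 with
          | nil => rw [hx] at ihh; simp at ihh
          | cons j rest => exact ⟨j, rest, rfl⟩
        have hj : j = leadRun cs := by
          rw [hjr] at ihh; have h := ihh; simp only [List.head?_cons, Option.some.injEq] at h
          omega
        have hj0 : 0 ≤ j := hj ▸ leadRun_nonneg cs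
        have hF : pipeFrom (j :: rest) = maxGapF cs := by rw [← hjr]; exact ihp
        refine ⟨?_, by simp⟩
        rw [idxs_shift cs 1, hjr]
        simp only [List.map_cons]
        cases rest with
        | nil =>
          have hF0 : maxGapF cs = 0 := by
            rw [← hF]; simp [pipeFrom, PySem.List.len]
          have : diffs [0, 1 + j] = [1 + j - 0 - 1] := rfl
          simp only [pipeFrom, PySem.List.len, List.map_nil, this, PySem.List.max?_id_cons,
            List.foldl_nil]
          rw [if_neg (by simp)]
          simp [h1, hF0, hj]
          omega
        | cons r t =>
          have hmap : (r :: t).map (fun x => 1 + x) = (1 + r) :: t.map (fun x => 1 + x) := rfl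
          have hdl : diffs (0 :: (1 + j) :: (r :: t).map (fun x => 1 + x))
              = (1 + j - 0 - 1) :: diffs ((1 + j) :: (r :: t).map (fun x => 1 + x)) := rfl
          have hshift : diffs ((1 + j) :: (r :: t).map (fun x => 1 + x)) = diffs (j :: r :: t) := by
            have : (1 + j) :: (r :: t).map (fun x => 1 + x) = (j :: r :: t).map (fun x => 1 + x) := rfl
            rw [this, diffs_map_add]
          have hdr : diffs (j :: r :: t) = (r - j - 1) :: diffs (r :: t) := rfl
          have hM : maxGapF cs = (diffs (r :: t)).foldl max (r - j - 1) := by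
            rw [← hF]
            simp only [pipeFrom, PySem.List.len]
            rw [if_neg (by simp), hdr, PySem.List.max?_id_cons]
          simp only [pipeFrom, PySem.List.len, hdl, hshift, hdr, PySem.List.max?_id_cons]
          rw [if_neg (by simp; omega)]
          simp only [List.foldl_cons]
          have : max (1 + j - 0 - 1) (r - j - 1) = max j (r - j - 1) := by
            congr 1; omega
          rw [this, foldl_max_max, ← hM]
          simp only [h1, Bool.true_and, ← hj, decide_eq_true_eq, max_def]
          split_ifs <;> omega
      · -- cs has no '1': idxs cs 0 = [], new indices = [0], pipeFrom = 0
        rw [if_neg h1] at ihh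
        have hnil : idxs cs 0 = [] := by
          cases hx : idxs cs 0 with
          | nil => rfl
          | cons j rest => rw [hx] at ihh; simp at ihh
        rw [idxs_shift cs 1, hnil]
        simp only [List.map_nil]
        have hF : maxGapF cs = 0 := by rw [← ihp, hnil]; simp [pipeFrom, PySem.List.len]
        simp [pipeFrom, PySem.List.len, h1, hF]
    · simp only [idxs, maxGapF, oneIn, leadRun, if_neg hd]
      simp only [zero_add]
      rw [idxs_shift cs 1]
      have hpipe : pipeFrom ((idxs cs 0).map (1 + ·)) = pipeFrom (idxs cs 0) := by
        unfold pipeFrom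
        rw [diffs_map_add]
        simp [PySem.List.len]
      have hone : (d == '1') = false := by simpa using hd
      rw [hpipe, ihp, List.head?_map, ihh, hone]
      constructor
      · rfl
      · by_cases h1 : oneIn cs <;> (simp [h1]; try omega)

theorem maxGapF_cons_ne (d : Char) (cs : List Char) (hd : d ≠ '1') :
    maxGapF (d :: cs) = maxGapF cs := by
  simp [maxGapF, hd]

theorem solution_eq_maxGapF (N : Int) : solution N = maxGapF (bitsChars N.natAbs) := by
  rw [solution_eq_pipe]
  by_cases hN : N < 0
  · rw [show PySem.Int.toBinChars0b N
        = '-' :: '0' :: 'b' :: Nat.toDigits 2 N.natAbs by simp [PySem.Int.toBinChars0b, hN],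
      PySem.List.slice_from _ (by norm_num)]
    show pipeFrom (idxs ('b' :: Nat.toDigits 2 N.natAbs) 0) = _
    rw [(pipe_idxs _).1, maxGapF_cons_ne _ _ (by decide), toDigits_two_eq]
  · rw [show PySem.Int.toBinChars0b N
        = '0' :: 'b' :: Nat.toDigits 2 N.toNat by simp [PySem.Int.toBinChars0b, hN],
      PySem.List.slice_from _ (by norm_num)]
    show pipeFrom (idxs (Nat.toDigits 2 N.toNat) 0) = _
    rw [(pipe_idxs _).1, toDigits_two_eq, show N.toNat = N.natAbs by omega]

-- ===== VERDICT (by name: the statement is the Claim_ definition above) =====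
theorem solution_spec : Claim_equal_solution := by
  intro N _
  unfold Spec_solution
  rw [solution_eq_maxGapF, solution_alt_eq]
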